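-- pv_equiv track=rewrite | github.com/cnm13ryan/inoculation-prompting | followups/build_paired_corpus.py | euclidean_steps
-- ===== SOURCE A (Python) =====
-- def euclidean_steps(a: int, b: int) -> list[tuple[int, int, int, int]]:
--     """Return list of (a_i, b_i, q_i, r_i) for the Euclidean reduction."""
--     a, b = max(a, b), min(a, b)
--     out = []
--     while b != 0:
--         q, r = divmod(a, b)
--         out.append((a, b, q, r))
--         a, b = b, r
--     return out
-- ===== SOURCE B (Python) =====
-- def euclidean_steps(a: int, b: int) -> list[tuple[int, int, int, int]]:
--     """Return list of (a_i, b_i, q_i, r_i) for the Euclidean reduction."""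
--     # Stage 1: build the remainder chain starting from (max, min) down to 0.
--     chain = [max(a, b), min(a, b)]
--     while chain[-1] != 0:
--         chain.append(chain[-2] % chain[-1])
--     # Stage 2: read every step off three staggered views of the chain.
--     return [(x, y, x // y, r) for x, y, r in zip(chain, chain[1:], chain[2:])]
-- ===== Notes on version B (the rewrite author's own statement) =====
-- stated objective: alternative
-- what changed: Replaces A's single loop that computes divmod and appends full step tuples by a two-stage pipeline: first build the bare remainder chain [max,min,r1,...,0], then derive all (a,b,q,r) tuples by zipping three staggered views of that chain.
import Mathlib
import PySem

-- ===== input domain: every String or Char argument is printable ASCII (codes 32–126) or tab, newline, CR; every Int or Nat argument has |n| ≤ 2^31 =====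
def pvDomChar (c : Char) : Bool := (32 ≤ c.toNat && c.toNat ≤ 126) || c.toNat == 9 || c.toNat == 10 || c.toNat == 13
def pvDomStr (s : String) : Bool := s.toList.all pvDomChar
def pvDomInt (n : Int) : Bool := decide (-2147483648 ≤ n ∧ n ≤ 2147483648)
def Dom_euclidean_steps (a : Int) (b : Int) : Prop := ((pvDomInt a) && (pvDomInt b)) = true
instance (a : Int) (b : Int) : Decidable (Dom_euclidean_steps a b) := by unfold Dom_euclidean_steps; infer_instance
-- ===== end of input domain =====

-- B replaces A's single divmod-and-append loop by a two-stage pipeline: build the bare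
-- remainder chain first, then zip three staggered views of it into the step tuples
-- (alternative decomposition, same cost).

-- termination measure shared by both recursions: |a % b| < |b| when b ≠ 0 (Python floor mod)
theorem pv_mod_natAbs_lt (a b : Int) (hb : b ≠ 0) : (PySem.Int.mod a b).natAbs < b.natAbs := by
  rcases lt_or_gt_of_ne hb with h | h
  · have := PySem.Int.mod_neg_bounds a h; omega
  · have h1 := PySem.Int.mod_nonneg a h
    have h2 := PySem.Int.mod_lt a h
    omega

-- ===== PORT A =====
-- A's while-loop: mutable (a, b, out), appending the divmod step each iteration
def euclideanLoopA (a b : Int) (out : List (Int × Int × Int × Int)) : List (Int × Int × Int × Int) :=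
  if _hb : b = 0 then out
  else
    let q := PySem.Int.floordiv a b
    let r := PySem.Int.mod a b
    euclideanLoopA b r (out ++ [(a, b, q, r)])
termination_by b.natAbs
decreasing_by exact pv_mod_natAbs_lt a b _hb

def euclidean_steps (a : Int) (b : Int) : List (Int × Int × Int × Int) :=
  euclideanLoopA (max a b) (min a b) []

-- ===== PORT B =====
-- Stage 1 of B: the remainder chain [x, y, x % y, ...] ending in 0; the Python loop's
-- state is the list's last two elements, so it is ported as recursion on that pair.
def chainB (x y : Int) : List Int :=
  if _hy : y = 0 then [x, y]
  else x :: chainB y (PySem.Int.mod x y)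
termination_by y.natAbs
decreasing_by exact pv_mod_natAbs_lt x y _hy

-- Stage 2 of B: zip(chain, chain[1:], chain[2:]); the nonnegative-index slices chain[1:]
-- and chain[2:] are ported exactly as List.drop 1 / List.drop 2.
def euclidean_steps_alt (a : Int) (b : Int) : List (Int × Int × Int × Int) :=
  let chain := chainB (max a b) (min a b)
  ((chain.zip (chain.drop 1)).zip (chain.drop 2)).map
    (fun p => (p.1.1, p.1.2, PySem.Int.floordiv p.1.1 p.1.2, p.2))

-- ===== PRECONDITION & SPEC =====
def Spec_euclidean_steps (a : Int) (b : Int) (out : List (Int × Int × Int × Int)) : Prop := out = euclidean_steps_alt a b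
instance (a : Int) (b : Int) (out : List (Int × Int × Int × Int)) : Decidable (Spec_euclidean_steps a b out) := by unfold Spec_euclidean_steps; infer_instance

-- ===== CLAIM (what is proved, stated in full; the proofs are below) =====
def Claim_equal_euclidean_steps : Prop := ∀ (a : Int) (b : Int), Dom_euclidean_steps a b → Spec_euclidean_steps a b (euclidean_steps a b)

-- ===== LEMMAS AND PROOFS =====
-- B's stage-2 pipeline as a function of the chain
def pairsB (l : List Int) : List (Int × Int × Int × Int) :=
  ((l.zip (l.drop 1)).zip (l.drop 2)).map
    (fun p => (p.1.1, p.1.2, PySem.Int.floordiv p.1.1 p.1.2, p.2))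

theorem chainB_head2 (x y : Int) : ∃ t, chainB x y = x :: y :: t := by
  fun_induction chainB x y with
  | case1 => exact ⟨[], rfl⟩
  | case2 x y hy ih =>
      obtain ⟨t, ht⟩ := ih
      exact ⟨(PySem.Int.mod x y) :: t, by rw [ht]⟩

theorem loopA_eq_pairs_chain (a b : Int) (out : List (Int × Int × Int × Int)) :
    euclideanLoopA a b out = out ++ pairsB (chainB a b) := by
  fun_induction euclideanLoopA a b out with
  | case1 =>
      simp_all [chainB, pairsB]
  | case2 =>
      rename_i a b out hb q r ih
      obtain ⟨t, ht⟩ := chainB_head2 b (PySem.Int.mod a b)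
      rw [chainB, dif_neg hb, ht, ih, ht]
      simp [pairsB, List.append_assoc, q, r]

-- ===== VERDICT (by name: the statement is the Claim_ definition above) =====
theorem euclidean_steps_spec : Claim_equal_euclidean_steps := by
  intro a b _
  unfold Spec_euclidean_steps euclidean_steps euclidean_steps_alt
  simpa [pairsB] using loopA_eq_pairs_chain (max a b) (min a b) []
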